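-- pv_equiv track=rewrite | github.com/linlingyi/Equinox | core/morning_brief.py | _time_of_day
-- ===== SOURCE A (Python) =====
-- TIME_OF_DAY = {
--     (5, 8):   "清晨",
--     (8, 11):  "上午",
--     (11, 13): "正午",
--     (13, 17): "下午",
--     (17, 20): "傍晚",
--     (20, 23): "夜晚",
--     (23, 5):  "深夜",
-- }
--
-- def _time_of_day(hour: int) -> str:
--     for (start, end), label in TIME_OF_DAY.items():
--         if start <= end:
--             if start <= hour < end:
--                 return label
--         else:  # wraps midnight
--             if hour >= start or hour < end:
--                 return label
--     return "某个时刻"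
-- ===== SOURCE B (Python) =====
-- # 24-entry lookup table indexed by hour; out-of-range hours map to "深夜"
-- _LABELS = (
--     ["深夜"] * 5 + ["清晨"] * 3 + ["上午"] * 3 + ["正午"] * 2 +
--     ["下午"] * 4 + ["傍晚"] * 3 + ["夜晚"] * 3 + ["深夜"]
-- )
--
-- def _time_of_day(hour: int) -> str:
--     return _LABELS[hour] if 0 <= hour < 24 else "深夜"
-- ===== Notes on version B (the rewrite author's own statement) =====
-- stated objective: simpler
-- what changed: Replaces the scan over interval keys (with a midnight-wrap branch) by direct indexing into a precomputed 24-entry label table, with a single range guard for out-of-range hours.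
import Mathlib
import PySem

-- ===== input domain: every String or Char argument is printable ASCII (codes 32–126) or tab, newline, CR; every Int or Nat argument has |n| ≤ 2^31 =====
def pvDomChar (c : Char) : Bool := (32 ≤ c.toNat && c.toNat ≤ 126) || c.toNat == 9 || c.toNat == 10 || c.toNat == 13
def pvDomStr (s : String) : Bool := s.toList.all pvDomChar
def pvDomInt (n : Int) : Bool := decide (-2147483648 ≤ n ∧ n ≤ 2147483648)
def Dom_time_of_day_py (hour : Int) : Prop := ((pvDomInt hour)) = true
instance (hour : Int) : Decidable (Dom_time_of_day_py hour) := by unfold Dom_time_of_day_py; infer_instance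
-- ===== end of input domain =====

-- B replaces A's scan over interval keys by direct indexing into a 24-entry label table (objective: simpler).

-- ===== PORT A =====
-- the TIME_OF_DAY dict, in insertion order
def TIME_OF_DAY : List ((Int × Int) × String) :=
  [((5, 8), "清晨"), ((8, 11), "上午"), ((11, 13), "正午"), ((13, 17), "下午"),
   ((17, 20), "傍晚"), ((20, 23), "夜晚"), ((23, 5), "深夜")]

-- the for-loop over TIME_OF_DAY.items() with early return
def todLoop (items : List ((Int × Int) × String)) (hour : Int) : String :=
  match items with
  | [] => "某个时刻"
  | ((s, e), label) :: rest =>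
    if s ≤ e then
      if s ≤ hour ∧ hour < e then label else todLoop rest hour
    else
      if hour ≥ s ∨ hour < e then label else todLoop rest hour

def time_of_day_py (hour : Int) : String := todLoop TIME_OF_DAY hour

-- ===== PORT B =====
def LABELS : List String :=
  List.replicate 5 "深夜" ++ List.replicate 3 "清晨" ++ List.replicate 3 "上午" ++
  List.replicate 2 "正午" ++ List.replicate 4 "下午" ++ List.replicate 3 "傍晚" ++
  List.replicate 3 "夜晚" ++ ["深夜"]

def time_of_day_py_alt (hour : Int) : String :=
  if 0 ≤ hour ∧ hour < 24 then (PySem.List.pyGet? LABELS hour).getD "深夜" else "深夜"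

-- ===== PRECONDITION & SPEC =====
def Spec_time_of_day_py (hour : Int) (out : String) : Prop := out = time_of_day_py_alt hour
instance (hour : Int) (out : String) : Decidable (Spec_time_of_day_py hour out) := by unfold Spec_time_of_day_py; infer_instance

-- ===== CLAIM (what is proved, stated in full; the proofs are below) =====
def Claim_equal_time_of_day_py : Prop := ∀ (hour : Int), Dom_time_of_day_py hour → Spec_time_of_day_py hour (time_of_day_py hour)

-- ===== LEMMAS AND PROOFS =====

-- A's loop returns "深夜" for any hour outside [5,23): every proper interval is skipped
-- and the wrap-around entry (23,5) fires
theorem todLoop_wrap (hour : Int) (h : hour < 5 ∨ 23 ≤ hour) :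
    time_of_day_py hour = "深夜" := by
  unfold time_of_day_py TIME_OF_DAY
  rw [todLoop, if_pos (by omega : (5:Int) ≤ 8), if_neg (by omega : ¬ ((5:Int) ≤ hour ∧ hour < 8))]
  rw [todLoop, if_pos (by omega : (8:Int) ≤ 11), if_neg (by omega : ¬ ((8:Int) ≤ hour ∧ hour < 11))]
  rw [todLoop, if_pos (by omega : (11:Int) ≤ 13), if_neg (by omega : ¬ ((11:Int) ≤ hour ∧ hour < 13))]
  rw [todLoop, if_pos (by omega : (13:Int) ≤ 17), if_neg (by omega : ¬ ((13:Int) ≤ hour ∧ hour < 17))]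
  rw [todLoop, if_pos (by omega : (17:Int) ≤ 20), if_neg (by omega : ¬ ((17:Int) ≤ hour ∧ hour < 20))]
  rw [todLoop, if_pos (by omega : (20:Int) ≤ 23), if_neg (by omega : ¬ ((20:Int) ≤ hour ∧ hour < 23))]
  rw [todLoop, if_neg (by omega : ¬ ((23:Int) ≤ 5)), if_pos (by omega : hour ≥ 23 ∨ hour < 5)]

-- B returns "深夜" outside [0,24)
theorem alt_out (hour : Int) (h : hour < 0 ∨ 24 ≤ hour) :
    time_of_day_py_alt hour = "深夜" := by
  unfold time_of_day_py_alt
  rw [if_neg (by omega : ¬ ((0:Int) ≤ hour ∧ hour < 24))]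

-- ===== VERDICT (by name: the statement is the Claim_ definition above) =====
theorem time_of_day_py_spec : Claim_equal_time_of_day_py := by
  intro hour _
  unfold Spec_time_of_day_py
  rcases lt_or_ge hour 0 with hlt | hge
  · rw [todLoop_wrap hour (Or.inl (by omega)), alt_out hour (Or.inl hlt)]
  · rcases lt_or_ge hour 24 with hlt24 | hge24
    · interval_cases hour <;> decide
    · rw [todLoop_wrap hour (Or.inr (by omega)), alt_out hour (Or.inr hge24)]
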